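-- pv_equiv track=rewrite | github.com/MiLk/adventofcode | 2016/day11/main.py | apply_state
-- ===== SOURCE A (Python) =====
-- def build_gm_tuple(g, m):
--     return tuple(sorted(g)), tuple(sorted(m))
--
-- def remove(floor, move):
--     return build_gm_tuple(set(floor[0]) - set(move[0]),
--                           set(floor[1]) - set(move[1]))
--
-- def add(floor, move):
--     return build_gm_tuple(list(floor[0]) + list(move[0]),
--                           list(floor[1]) + list(move[1]))
--
-- def apply_state(state, move):
--     floors = []
--     for i, floor in enumerate(state[1]):
--         if i == state[0]:
--             floors.append(remove(floor, move[1]))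
--         elif i == move[0]:
--             floors.append(add(floor, move[1]))
--         else:
--             floors.append(floor)
--     return (move[0], tuple(floors))
-- ===== SOURCE B (Python) =====
-- def _merge(xs, ys):
--     # merge two already-sorted lists
--     out = []
--     i = j = 0
--     while i < len(xs) and j < len(ys):
--         if xs[i] <= ys[j]:
--             out.append(xs[i]); i += 1
--         else:
--             out.append(ys[j]); j += 1
--     out.extend(xs[i:])
--     out.extend(ys[j:])
--     return out
--
-- def _added(floor, items):
--     return (tuple(_merge(sorted(floor[0]), sorted(items[0]))),
--             tuple(_merge(sorted(floor[1]), sorted(items[1]))))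
--
-- def _removed(floor, items):
--     return (tuple(x for x in sorted(set(floor[0])) if x not in items[0]),
--             tuple(x for x in sorted(set(floor[1])) if x not in items[1]))
--
-- def apply_state(state, move):
--     src, floors0 = state
--     dst, items = move
--     floors = list(floors0)
--     if 0 <= dst < len(floors):
--         floors[dst] = _added(floors0[dst], items)
--     if 0 <= src < len(floors):
--         floors[src] = _removed(floors0[src], items)
--     return (dst, tuple(floors))
-- ===== Notes on version B (the rewrite author's own statement) =====
-- stated objective: alternative
-- what changed: B drops A's loop over every floor in favour of two targeted index updates, and its helpers use different algorithms: the destination floor is built by merging the two sorted halves instead of sorting the concatenation, and the source floor by filtering the sorted deduplicated floor against the moved items instead of taking a set difference and then sorting.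
import Mathlib
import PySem

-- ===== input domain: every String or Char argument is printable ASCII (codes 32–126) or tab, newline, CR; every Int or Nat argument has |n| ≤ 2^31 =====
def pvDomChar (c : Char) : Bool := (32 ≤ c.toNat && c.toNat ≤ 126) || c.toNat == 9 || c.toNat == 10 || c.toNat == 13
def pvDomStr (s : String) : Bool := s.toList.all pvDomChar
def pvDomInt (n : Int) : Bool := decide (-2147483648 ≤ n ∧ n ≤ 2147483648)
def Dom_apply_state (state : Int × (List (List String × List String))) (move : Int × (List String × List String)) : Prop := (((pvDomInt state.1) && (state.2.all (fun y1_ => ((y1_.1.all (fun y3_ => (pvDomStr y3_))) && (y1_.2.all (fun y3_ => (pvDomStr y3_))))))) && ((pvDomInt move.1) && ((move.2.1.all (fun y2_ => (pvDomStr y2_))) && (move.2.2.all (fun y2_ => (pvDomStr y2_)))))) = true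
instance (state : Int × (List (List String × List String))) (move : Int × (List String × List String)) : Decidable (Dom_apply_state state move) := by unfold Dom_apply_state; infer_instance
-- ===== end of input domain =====

-- B replaces A's loop over every floor (with re-sorting helpers) by two targeted index
-- updates whose helpers use different algorithms: the destination floor is a MERGE of the
-- two sorted halves (no sort of the concatenation), the source floor is a filter of the
-- sorted deduplicated floor (no set difference before sorting). Objective: alternative.

-- ===== PORT A =====
def pvBuildGM (g m : List String) : List String × List String :=
  (PySem.List.sorted g (fun x => x) false, PySem.List.sorted m (fun x => x) false)

def pvRemove (floor mv : List String × List String) : List String × List String :=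
  pvBuildGM (PySem.Set.diff (PySem.Set.ofList floor.1) (PySem.Set.ofList mv.1))
            (PySem.Set.diff (PySem.Set.ofList floor.2) (PySem.Set.ofList mv.2))

def pvAdd (floor mv : List String × List String) : List String × List String :=
  pvBuildGM (floor.1 ++ mv.1) (floor.2 ++ mv.2)

def apply_state (state : Int × (List (List String × List String))) (move : Int × (List String × List String)) : Int × (List (List String × List String)) :=
  let floors := (PySem.List.enumerate state.2 0).foldl
    (fun acc p =>
      if p.1 == state.1 then acc ++ [pvRemove p.2 move.2]
      else if p.1 == move.1 then acc ++ [pvAdd p.2 move.2]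
      else acc ++ [p.2]) []
  (move.1, floors)

-- ===== PORT B =====
-- transcription of Source B's hand-written while-loop merge of two sorted lists
def pvMergeB : List String → List String → List String
  | [], ys => ys
  | x :: xs, [] => x :: xs
  | x :: xs, y :: ys =>
      if x ≤ y then x :: pvMergeB xs (y :: ys)
      else y :: pvMergeB (x :: xs) ys

def pvAddedB (floor items : List String × List String) : List String × List String :=
  (pvMergeB (PySem.List.sorted floor.1 (fun x => x) false) (PySem.List.sorted items.1 (fun x => x) false),
   pvMergeB (PySem.List.sorted floor.2 (fun x => x) false) (PySem.List.sorted items.2 (fun x => x) false))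

def pvRemovedB (floor items : List String × List String) : List String × List String :=
  ((PySem.List.sorted (PySem.Set.ofList floor.1) (fun x => x) false).filter (fun x => !(items.1.contains x)),
   (PySem.List.sorted (PySem.Set.ofList floor.2) (fun x => x) false).filter (fun x => !(items.2.contains x)))

def apply_state_alt (state : Int × (List (List String × List String))) (move : Int × (List String × List String)) : Int × (List (List String × List String)) :=
  let floors0 := state.2
  let n : Int := (floors0.length : Int)
  let floors1 :=
    if 0 ≤ move.1 ∧ move.1 < n then
      PySem.List.pySetD floors0 move.1 (pvAddedB (PySem.List.pyGetD floors0 move.1 ([], [])) move.2)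
    else floors0
  let floors2 :=
    if 0 ≤ state.1 ∧ state.1 < n then
      PySem.List.pySetD floors1 state.1 (pvRemovedB (PySem.List.pyGetD floors0 state.1 ([], [])) move.2)
    else floors1
  (move.1, floors2)

-- ===== PRECONDITION & SPEC =====
def Spec_apply_state (state : Int × (List (List String × List String))) (move : Int × (List String × List String)) (out : Int × (List (List String × List String))) : Prop := out = apply_state_alt state move
instance (state : Int × (List (List String × List String))) (move : Int × (List String × List String)) (out : Int × (List (List String × List String))) : Decidable (Spec_apply_state state move out) := by unfold Spec_apply_state; infer_instance

-- ===== CLAIM =====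
def Claim_equal_apply_state : Prop := ∀ (state : Int × (List (List String × List String))) (move : Int × (List String × List String)), Dom_apply_state state move → Spec_apply_state state move (apply_state state move)

-- ===== LEMMAS AND PROOFS =====
theorem mergeB_eq_merge (xs ys : List String) :
    pvMergeB xs ys = List.merge xs ys (fun a b => a ≤ b) := by
  induction xs generalizing ys with
  | nil => cases ys <;> simp [pvMergeB]
  | cons x xs ih =>
    induction ys with
    | nil => simp [pvMergeB]
    | cons y ys ihy => simp [pvMergeB, List.merge, ih, ihy]

theorem sorted_append_eq_mergeB (a b : List String) :
    PySem.List.sorted (a ++ b) (fun x => x) false =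
      pvMergeB (PySem.List.sorted a (fun x => x) false) (PySem.List.sorted b (fun x => x) false) := by
  rw [mergeB_eq_merge]
  apply PySem.List.eq_of_perm_of_pairwise_le_of_injective (fun x => x) (fun _ _ h => h)
  · exact (PySem.List.sorted_perm _ _ _).trans
      (((List.merge_perm_append (fun a b => decide (a ≤ b))).trans
        ((PySem.List.sorted_perm _ _ _).append (PySem.List.sorted_perm _ _ _))).symm)
  · exact PySem.List.sorted_pairwise _ _
  · exact List.Pairwise.merge (PySem.List.sorted_pairwise _ _) (PySem.List.sorted_pairwise _ _)

theorem add_eq (floor mv : List String × List String) : pvAdd floor mv = pvAddedB floor mv := by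
  simp [pvAdd, pvAddedB, pvBuildGM, sorted_append_eq_mergeB]

theorem diff_eq_filter (g t : List String) :
    PySem.Set.diff (PySem.Set.ofList g) (PySem.Set.ofList t) =
      (PySem.Set.ofList g).filter (fun x => !(t.contains x)) := by
  simp [PySem.Set.diff, PySem.Set.contains]

theorem sorted_diff_eq_filter_sorted (g t : List String) :
    PySem.List.sorted (PySem.Set.diff (PySem.Set.ofList g) (PySem.Set.ofList t)) (fun x => x) false =
      (PySem.List.sorted (PySem.Set.ofList g) (fun x => x) false).filter (fun x => !(t.contains x)) := by
  apply PySem.List.sorted_eq_of_perm_of_pairwise_lt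
  · rw [diff_eq_filter]
    exact (PySem.List.sorted_perm _ _ _).filter _
  · exact (PySem.List.sorted_ofList_pairwise_lt g).sublist List.filter_sublist

theorem remove_eq (floor mv : List String × List String) : pvRemove floor mv = pvRemovedB floor mv := by
  simp [pvRemove, pvRemovedB, pvBuildGM, sorted_diff_eq_filter_sorted]

theorem fold_eq_map (xs : List (List String × List String)) (a b : Int) (mv : List String × List String) :
    (PySem.List.enumerate xs 0).foldl
      (fun acc p =>
        if p.1 == a then acc ++ [pvRemove p.2 mv]
        else if p.1 == b then acc ++ [pvAdd p.2 mv]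
        else acc ++ [p.2]) [] =
    (PySem.List.enumerate xs 0).map
      (fun p =>
        if p.1 == a then pvRemove p.2 mv
        else if p.1 == b then pvAdd p.2 mv
        else p.2) := by
  have hbody : (fun (acc : List (List String × List String)) (p : Int × (List String × List String)) =>
        if p.1 == a then acc ++ [pvRemove p.2 mv]
        else if p.1 == b then acc ++ [pvAdd p.2 mv]
        else acc ++ [p.2]) =
      fun acc p => acc ++ [if p.1 == a then pvRemove p.2 mv
        else if p.1 == b then pvAdd p.2 mv else p.2] := by
    funext acc p
    split_ifs <;> rfl
  rw [hbody, PySem.List.foldl_append_singleton_eq_map, List.nil_append]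

theorem apply_state_spec : Claim_equal_apply_state := by
  intro state move _
  obtain ⟨a, xs⟩ := state
  obtain ⟨b, mv⟩ := move
  unfold Spec_apply_state apply_state apply_state_alt
  simp only [fold_eq_map]
  refine Prod.ext rfl ?_
  apply List.ext_getElem?
  intro k
  simp only [List.getElem?_map, PySem.List.getElem?_enumerate]
  by_cases hk : k < xs.length
  · rw [List.getElem?_eq_getElem hk]
    simp only [Option.map_some]
    by_cases hB : 0 ≤ b ∧ b < (xs.length : Int)
    · rw [if_pos hB, PySem.List.pySetD_of_nonneg _ _ hB.1,
          PySem.List.pyGetD_eq_getElem _ _ hB.1 hB.2]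
      by_cases hA : 0 ≤ a ∧ a < (xs.length : Int)
      · rw [if_pos hA, PySem.List.pySetD_of_nonneg _ _ hA.1,
            PySem.List.pyGetD_eq_getElem _ _ hA.1 hA.2]
        simp only [beq_iff_eq, List.getElem?_set, remove_eq, add_eq]
        split_ifs <;>
          first
            | omega
            | rw [List.getElem?_eq_getElem hk]
            | simp_all
      · rw [if_neg hA]
        have ha : ¬ ((0 : Int) + (k : Int) = a) := fun h => hA ⟨by omega, by omega⟩
        simp only [beq_iff_eq, List.getElem?_set, remove_eq, add_eq]
        split_ifs <;>
          first
            | omega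
            | rw [List.getElem?_eq_getElem hk]
            | simp_all
    · rw [if_neg hB]
      have hb : ¬ ((0 : Int) + (k : Int) = b) := fun h => hB ⟨by omega, by omega⟩
      by_cases hA : 0 ≤ a ∧ a < (xs.length : Int)
      · rw [if_pos hA, PySem.List.pySetD_of_nonneg _ _ hA.1,
            PySem.List.pyGetD_eq_getElem _ _ hA.1 hA.2]
        simp only [beq_iff_eq, List.getElem?_set, remove_eq, add_eq]
        split_ifs <;>
          first
            | omega
            | rw [List.getElem?_eq_getElem hk]
            | simp_all
      · rw [if_neg hA]
        have ha : ¬ ((0 : Int) + (k : Int) = a) := fun h => hA ⟨by omega, by omega⟩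
        simp only [beq_iff_eq]
        rw [if_neg ha, if_neg hb, List.getElem?_eq_getElem hk]
  · rw [List.getElem?_eq_none (by omega : xs.length ≤ k)]
    simp only [Option.map_none]
    have hlen : (if 0 ≤ a ∧ a < ((xs.length : Int)) then
        PySem.List.pySetD
          (if 0 ≤ b ∧ b < ((xs.length : Int)) then
            PySem.List.pySetD xs b (pvAddedB (PySem.List.pyGetD xs b ([], [])) mv)
          else xs) a (pvRemovedB (PySem.List.pyGetD xs a ([], [])) mv)
      else
        if 0 ≤ b ∧ b < ((xs.length : Int)) then
          PySem.List.pySetD xs b (pvAddedB (PySem.List.pyGetD xs b ([], [])) mv)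
        else xs).length = xs.length := by
      split_ifs <;> simp [PySem.List.length_pySetD]
    symm
    apply List.getElem?_eq_none
    rw [hlen]
    omega
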